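-- pv_equiv track=rewrite | github.com/Gautardos/navidrome-tool | cli/genre_list.py | build_inventory
-- ===== SOURCE A (Python) =====
-- def build_inventory(genres_with_titles, recursive=False):
--     """Construit un inventaire à partir des genres et titres générés par extract_genres_from_mp3."""
--     genre_inventory = {}  # Dictionnaire {genre: set(titres)} pour éviter les doublons
--     for genre, title in genres_with_titles:
--         if genre in genre_inventory:
--             genre_inventory[genre].add(title)
--         else:
--             genre_inventory[genre] = {title}
--     # Convertir les sets en listes triées et retourner une liste triée de tuples (genre, titres)
--     return sorted([(genre, sorted(list(titres))) for genre, titres in genre_inventory.items()], key=lambda x: x[0])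
-- ===== SOURCE B (Python) =====
-- def build_inventory(genres_with_titles, recursive=False):
--     """Construit un inventaire a partir des genres et titres generes par extract_genres_from_mp3."""
--     order = sorted(set(g for g, _ in genres_with_titles))
--     return [(g, sorted(set(t for gg, t in genres_with_titles if gg == g))) for g in order]
-- ===== Notes on version B (the rewrite author's own statement) =====
-- stated objective: simpler
-- what changed: Replaces A's dict-of-sets grouping pass followed by per-entry sorting with two comprehensions: sort the distinct genres once, then build each genre's sorted distinct title list by filtering the input.
import Mathlib
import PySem

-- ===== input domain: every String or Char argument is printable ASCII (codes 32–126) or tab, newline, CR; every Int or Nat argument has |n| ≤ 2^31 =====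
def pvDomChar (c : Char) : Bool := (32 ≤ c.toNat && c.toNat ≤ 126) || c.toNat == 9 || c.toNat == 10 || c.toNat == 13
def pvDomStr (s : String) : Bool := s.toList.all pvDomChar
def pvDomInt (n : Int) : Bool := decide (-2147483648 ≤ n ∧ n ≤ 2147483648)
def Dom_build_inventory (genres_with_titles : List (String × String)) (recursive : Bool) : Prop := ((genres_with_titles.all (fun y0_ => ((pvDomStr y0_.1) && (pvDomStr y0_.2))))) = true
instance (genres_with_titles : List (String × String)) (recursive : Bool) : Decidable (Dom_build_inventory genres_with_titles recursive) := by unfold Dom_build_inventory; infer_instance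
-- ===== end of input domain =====

-- B replaces A's dict-of-sets grouping pass by sorting the distinct genres once and building each
-- group with a filtered comprehension (objective: simpler — no dict, two comprehensions).

-- ===== PORT A =====
def build_inventory (genres_with_titles : List (String × String)) (recursive : Bool) : List (String × List String) :=
  -- genre_inventory = {}; for genre, title in …: if genre in d: d[genre].add(title) else d[genre] = {title}
  PySem.List.sorted
    ((genres_with_titles.foldl
        (fun d p =>
          if d.contains p.1 then
            d.insert p.1 (PySem.Set.add (d.getD p.1 PySem.Set.empty) p.2)
          else
            d.insert p.1 (PySem.Set.ofList [p.2]))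
        (PySem.Dict.empty : PySem.Dict String (PySem.Set String))).items.map
      (fun p => (p.1, PySem.List.sorted p.2 (fun t => t) false)))
    (fun x => x.1) false

-- ===== PORT B =====
def build_inventory_alt (genres_with_titles : List (String × String)) (recursive : Bool) : List (String × List String) :=
  (PySem.List.sorted (PySem.Set.ofList (genres_with_titles.map (fun p => p.1))) (fun g => g) false).map
    (fun g =>
      (g, PySem.List.sorted
            (PySem.Set.ofList ((genres_with_titles.filter (fun p => p.1 == g)).map (fun p => p.2)))
            (fun t => t) false))

-- ===== PRECONDITION & SPEC =====
def Spec_build_inventory (genres_with_titles : List (String × String)) (recursive : Bool) (out : List (String × List String)) : Prop := out = build_inventory_alt genres_with_titles recursive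
instance (genres_with_titles : List (String × String)) (recursive : Bool) (out : List (String × List String)) : Decidable (Spec_build_inventory genres_with_titles recursive out) := by unfold Spec_build_inventory; infer_instance

-- ===== CLAIM (what is proved, stated in full; the proofs are below) =====
def Claim_equal_build_inventory : Prop := ∀ (genres_with_titles : List (String × String)) (recursive : Bool), Dom_build_inventory genres_with_titles recursive → Spec_build_inventory genres_with_titles recursive (build_inventory genres_with_titles recursive)

-- ===== LEMMAS AND PROOFS =====

-- A's loop body (branch on membership) is exactly Dict.modify with default ∅ and f = (Set.add · title).
theorem pv_step_eq (d : PySem.Dict String (PySem.Set String)) (p : String × String) :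
    (if d.contains p.1 then d.insert p.1 (PySem.Set.add (d.getD p.1 PySem.Set.empty) p.2)
     else d.insert p.1 (PySem.Set.ofList [p.2]))
    = d.modify p.1 PySem.Set.empty (fun s => PySem.Set.add s p.2) := by
  by_cases h : d.contains p.1
  · simp [h, PySem.Dict.modify]
  · rw [if_neg (by simp [h])]
    show d.insert p.1 (PySem.Set.ofList [p.2]) = d.insert p.1 (PySem.Set.add (d.getD p.1 PySem.Set.empty) p.2)
    rw [PySem.Dict.getD_of_not_contains d _ (by simpa using h)]
    rfl

-- the value the grouping fold leaves at key g
theorem pv_getD_fold (l : List (String × String)) (d : PySem.Dict String (PySem.Set String)) (g : String) :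
    (l.foldl (fun d p => d.modify p.1 PySem.Set.empty (fun s => PySem.Set.add s p.2)) d).getD g PySem.Set.empty
      = PySem.Set.update (d.getD g PySem.Set.empty) ((l.filter (fun p => p.1 == g)).map (fun p => p.2)) := by
  induction l generalizing d with
  | nil => rfl
  | cons p t ih =>
    rw [List.foldl_cons, ih, List.filter_cons]
    by_cases h : p.1 = g
    · rw [if_pos (by simp [h]), List.map_cons]
      rw [show PySem.Set.update (d.getD g PySem.Set.empty) (p.2 :: _) =
            PySem.Set.update (PySem.Set.add (d.getD g PySem.Set.empty) p.2) ((t.filter (fun p => p.1 == g)).map (fun p => p.2)) from rfl]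
      rw [PySem.Dict.getD_modify, if_pos h.symm, h]
    · rw [if_neg (by simp [h]), PySem.Dict.getD_modify, if_neg (fun hh => h hh.symm)]

theorem build_inventory_eq_alt (xs : List (String × String)) (rec : Bool) :
    build_inventory xs rec = build_inventory_alt xs rec := by
  unfold build_inventory build_inventory_alt
  have hstep : (fun (d : PySem.Dict String (PySem.Set String)) (p : String × String) =>
      if d.contains p.1 then d.insert p.1 (PySem.Set.add (d.getD p.1 PySem.Set.empty) p.2)
      else d.insert p.1 (PySem.Set.ofList [p.2]))
    = fun d p => d.modify p.1 PySem.Set.empty (fun s => PySem.Set.add s p.2) := by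
    funext d p; exact pv_step_eq d p
  rw [hstep]
  set D := xs.foldl (fun d p => d.modify p.1 PySem.Set.empty (fun s => PySem.Set.add s p.2)) PySem.Dict.empty with hD
  have hkeys : D.keys = PySem.Set.ofList (xs.map (fun p => p.1)) := by
    rw [hD, PySem.Dict.keys_foldl_modify_key xs (fun p => p.1) PySem.Set.empty
          (fun _ p => fun s => PySem.Set.add s p.2) PySem.Dict.empty, PySem.Dict.keys_empty]
    rfl
  have hnd : D.keys.Nodup := by
    rw [hD]
    exact PySem.Dict.nodup_keys_foldl_modify_key xs (fun p => p.1) PySem.Set.empty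
      (fun _ p => fun s => PySem.Set.add s p.2) PySem.Dict.empty PySem.Dict.nodup_keys_empty
  have hget : ∀ g, D.getD g PySem.Set.empty
      = PySem.Set.ofList ((xs.filter (fun p => p.1 == g)).map (fun p => p.2)) := by
    intro g
    rw [hD, pv_getD_fold, PySem.Dict.getD_empty]
    rfl
  rw [PySem.Dict.items_eq_map_keys D hnd PySem.Set.empty, List.map_map]
  simp only [hget, hkeys]
  exact PySem.List.sorted_eq_of_perm_of_pairwise_lt _ _ _
    ((PySem.List.sorted_perm _ _ _).map _)
    (List.pairwise_map.mpr (PySem.List.sorted_ofList_pairwise_lt _))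

-- ===== VERDICT (by name: the statement is the Claim_ definition above) =====
theorem build_inventory_spec : Claim_equal_build_inventory := by
  intro xs rec _
  exact build_inventory_eq_alt xs rec
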